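-- pv_equiv track=rewrite | github.com/joshsanz/beta-reader | src/beta_reader/core/text_chunker.py | _build_word_positions
-- ===== SOURCE A (Python) =====
-- def _build_word_positions(text: str) -> list[tuple[int, int]]:
--     """Build a list of (start, end) positions for each word in text.
--
--     Args:
--         text: Text to analyze.
--
--     Returns:
--         List of (start_pos, end_pos) tuples for each word.
--     """
--     word_positions = []
--     words = text.split()
--     current_pos = 0
--
--     for word in words:
--         # Find the word in the remaining text
--         word_start = text.find(word, current_pos)
--         if word_start == -1:
--             # Fallback: assume words are separated by single spaces
--             word_start = current_pos
--         word_end = word_start + len(word)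
--         word_positions.append((word_start, word_end))
--         current_pos = word_end
--
--     return word_positions
-- ===== SOURCE B (Python) =====
-- def _build_word_positions(text: str) -> list[tuple[int, int]]:
--     """Single linear scan: track the start of the current word; emit (start, end)
--     when whitespace ends a word, with a final flush at end-of-text."""
--     positions = []
--     start = -1
--     for i, ch in enumerate(text):
--         if ch.isspace():
--             if start >= 0:
--                 positions.append((start, i))
--                 start = -1
--         elif start < 0:
--             start = i
--     if start >= 0:
--         positions.append((start, len(text)))
--     return positions
-- ===== Notes on version B (the rewrite author's own statement) =====
-- stated objective: idiomatic
-- what changed: Replaced split()-then-find() repositioning (a split pass plus a find scan per word over the original text) with a single character-by-character scan that tracks the start index of the current word and flushes at whitespace or end-of-text.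
import Mathlib
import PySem

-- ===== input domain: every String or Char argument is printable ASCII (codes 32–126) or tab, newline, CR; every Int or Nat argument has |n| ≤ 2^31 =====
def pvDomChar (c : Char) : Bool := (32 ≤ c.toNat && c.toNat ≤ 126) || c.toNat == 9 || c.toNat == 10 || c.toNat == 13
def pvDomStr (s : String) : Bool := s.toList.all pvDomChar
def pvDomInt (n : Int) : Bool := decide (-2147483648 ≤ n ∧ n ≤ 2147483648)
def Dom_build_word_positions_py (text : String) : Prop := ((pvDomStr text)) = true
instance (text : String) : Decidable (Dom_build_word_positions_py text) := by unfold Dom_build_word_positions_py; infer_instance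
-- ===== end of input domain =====

-- B re-implements split()+find() repositioning as a single linear scan over the characters (idiomatic; same results).

-- ===== PORT A =====
-- the loop body of A: find the word from current_pos, fall back to current_pos, emit (start, end)
def pvStepA (text : String) (st : List (Int × Int) × Int) (word : String) : List (Int × Int) × Int :=
  let word_start := PySem.Str.findFrom text word st.2
  let word_start := if word_start = -1 then st.2 else word_start
  let word_end := word_start + PySem.Str.len word
  (st.1 ++ [(word_start, word_end)], word_end)

def build_word_positions_py (text : String) : List (Int × Int) :=
  let words := PySem.Str.split₀ text
  (words.foldl (pvStepA text) ([], 0)).1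

-- ===== PORT B =====
-- the loop body of B: on whitespace flush the open word, on non-whitespace open one
def pvStepB (st : List (Int × Int) × Int) (p : Int × Char) : List (Int × Int) × Int :=
  if PySem.Chars.isspace p.2 then
    if st.2 ≥ 0 then (st.1 ++ [(st.2, p.1)], -1) else st
  else if st.2 < 0 then (st.1, p.1) else st

def build_word_positions_py_alt (text : String) : List (Int × Int) :=
  let st := (PySem.List.enumerate text.toList).foldl pvStepB ([], -1)
  if st.2 ≥ 0 then st.1 ++ [(st.2, PySem.Str.len text)] else st.1

-- ===== PRECONDITION & SPEC =====
def Spec_build_word_positions_py (text : String) (out : List (Int × Int)) : Prop := out = build_word_positions_py_alt text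
instance (text : String) (out : List (Int × Int)) : Decidable (Spec_build_word_positions_py text out) := by unfold Spec_build_word_positions_py; infer_instance

-- ===== CLAIM (what is proved, stated in full; the proofs are below) =====
def Claim_equal_build_word_positions_py : Prop := ∀ (text : String), Dom_build_word_positions_py text → Spec_build_word_positions_py text (build_word_positions_py text)

-- ===== LEMMAS AND PROOFS =====

-- reference word-position function: skip spaces, emit one word span, recurse
def refWP : List Char → Nat → List (Int × Int)
  | [], _ => []
  | c :: rest, k =>
    if h : PySem.Chars.isspace c then refWP rest (k + 1)
    else
      let w := List.takeWhile (fun d => !PySem.Chars.isspace d) (c :: rest)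
      ((k : Int), ((k + w.length : Nat) : Int)) :: refWP (List.drop w.length (c :: rest)) (k + w.length)
termination_by cs _ => cs.length
decreasing_by
  · simp only [List.length_cons]; omega
  · have h1 : 1 ≤ (List.takeWhile (fun d => !PySem.Chars.isspace d) (c :: rest)).length := by
      simp [h]
    simp only [List.length_drop, List.length_cons]
    omega

-- char-level version of A's loop body
def pvStepAC (cs : List Char) (st : List (Int × Int) × Int) (w : List Char) : List (Int × Int) × Int :=
  let ws := PySem.Chars.findFrom cs w st.2
  let ws := if ws = -1 then st.2 else ws
  let we := ws + w.length
  (st.1 ++ [(ws, we)], we)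

-- decomposition of a string: all whitespace, or spaces ++ word ++ rest with rest empty or starting in whitespace
lemma pv_decomp (cs : List Char) :
    (∀ c ∈ cs, PySem.Chars.isspace c = true) ∨
    ∃ sp w rest, cs = sp ++ w ++ rest ∧ (∀ c ∈ sp, PySem.Chars.isspace c = true) ∧ w ≠ [] ∧
      (∀ c ∈ w, PySem.Chars.isspace c = false) ∧
      (rest = [] ∨ ∃ d rest', rest = d :: rest' ∧ PySem.Chars.isspace d = true) := by
  by_cases ht : List.dropWhile (fun c => PySem.Chars.isspace c) cs = []
  · left
    intro c hc
    simpa using List.dropWhile_eq_nil_iff.mp ht c hc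
  · right
    set t := List.dropWhile (fun c => PySem.Chars.isspace c) cs with htdef
    refine ⟨List.takeWhile (fun c => PySem.Chars.isspace c) cs,
      List.takeWhile (fun d => !PySem.Chars.isspace d) t,
      List.dropWhile (fun d => !PySem.Chars.isspace d) t, ?_, ?_, ?_, ?_, ?_⟩
    · rw [List.append_assoc, List.takeWhile_append_dropWhile, htdef, List.takeWhile_append_dropWhile]
    · intro c hc; simpa using List.mem_takeWhile_imp hc
    · obtain ⟨d, t', ht'⟩ := List.exists_cons_of_ne_nil ht
      have hd : PySem.Chars.isspace d = false := by
        have := List.head_dropWhile_not (fun c => PySem.Chars.isspace c) (l := cs) (by exact ht)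
        simpa [← htdef, ht'] using this
      simp [ht', hd]
    · intro c hc
      have := List.mem_takeWhile_imp hc
      simpa using this
    · by_cases hr : List.dropWhile (fun d => !PySem.Chars.isspace d) t = []
      · left; exact hr
      · right
        obtain ⟨d, r', hr'⟩ := List.exists_cons_of_ne_nil hr
        refine ⟨d, r', hr', ?_⟩
        have := List.head_dropWhile_not (fun d => !PySem.Chars.isspace d) (l := t) (by exact hr)
        simpa [hr'] using this

lemma pv_refWP_spaces (sp t : List Char) (k : Nat) (h : ∀ c ∈ sp, PySem.Chars.isspace c = true) :
    refWP (sp ++ t) k = refWP t (k + sp.length) := by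
  induction sp generalizing k with
  | nil => simp
  | cons c sp' ih =>
    have hc : PySem.Chars.isspace c = true := h c (by simp)
    rw [List.cons_append, refWP, dif_pos hc, ih (k + 1) (fun d hd => h d (by simp [hd]))]
    congr 1
    simp; omega

lemma pv_refWP_word (w rest : List Char) (k : Nat) (hw : w ≠ [])
    (hns : ∀ c ∈ w, PySem.Chars.isspace c = false)
    (hr : rest = [] ∨ ∃ d rest', rest = d :: rest' ∧ PySem.Chars.isspace d = true) :
    refWP (w ++ rest) k = ((k : Int), ((k + w.length : Nat) : Int)) :: refWP rest (k + w.length) := by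
  have htake : ∀ (v : List Char), (∀ c ∈ v, PySem.Chars.isspace c = false) →
      List.takeWhile (fun d => !PySem.Chars.isspace d) (v ++ rest) = v := by
    intro v
    induction v with
    | nil =>
      intro _
      rcases hr with rfl | ⟨d, rest', rfl, hd⟩
      · simp
      · simp [hd]
    | cons c w' ihw =>
      intro hv
      have hc : PySem.Chars.isspace c = false := hv c (by simp)
      rw [List.cons_append, List.takeWhile_cons]
      simp only [hc, Bool.not_false, if_true]
      rw [ihw (fun d hd => hv d (by simp [hd]))]
  have htake := htake w hns
  obtain ⟨c, w', rfl⟩ := List.exists_cons_of_ne_nil hw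
  have hc : PySem.Chars.isspace c = false := hns c (by simp)
  rw [List.cons_append, refWP, dif_neg (by simp [hc])]
  simp only [← List.cons_append, htake]
  rw [List.drop_left]

lemma pv_go_nil (cur : List Char) (acc : List (List Char)) :
    PySem.Chars.split₀.go [] cur acc =
      if cur.isEmpty then acc.reverse else (cur.reverse :: acc).reverse := by
  rw [PySem.Chars.split₀.go]

lemma pv_go_cons_space (c : Char) (rest cur : List Char) (acc : List (List Char))
    (h : PySem.Chars.isspace c = true) :
    PySem.Chars.split₀.go (c :: rest) cur acc =
      if cur.isEmpty then PySem.Chars.split₀.go rest [] acc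
      else PySem.Chars.split₀.go rest [] (cur.reverse :: acc) := by
  rw [PySem.Chars.split₀.go]; simp [h]

lemma pv_go_cons_nonspace (c : Char) (rest cur : List Char) (acc : List (List Char))
    (h : PySem.Chars.isspace c = false) :
    PySem.Chars.split₀.go (c :: rest) cur acc = PySem.Chars.split₀.go rest (c :: cur) acc := by
  rw [PySem.Chars.split₀.go]; simp [h]

lemma pv_go_acc (t : List Char) : ∀ (cur : List Char) (acc : List (List Char)),
    PySem.Chars.split₀.go t cur acc = acc.reverse ++ PySem.Chars.split₀.go t cur [] := by
  induction t with
  | nil =>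
    intro cur acc
    by_cases hc : cur.isEmpty <;> simp [pv_go_nil, hc]
  | cons c rest ih =>
    intro cur acc
    by_cases hs : PySem.Chars.isspace c
    · by_cases hc : cur.isEmpty
      · rw [pv_go_cons_space c rest cur acc hs, pv_go_cons_space c rest cur [] hs]
        rw [if_pos hc, if_pos hc]
        exact ih [] acc
      · rw [pv_go_cons_space c rest cur acc hs, pv_go_cons_space c rest cur [] hs]
        simp only [hc, Bool.false_eq_true, if_false]
        rw [ih [] (cur.reverse :: acc), ih [] [cur.reverse]]
        simp
    · rw [pv_go_cons_nonspace c rest cur acc (by simpa using hs),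
          pv_go_cons_nonspace c rest cur [] (by simpa using hs)]
      exact ih _ _

lemma pv_split₀_spaces (sp t : List Char) (h : ∀ c ∈ sp, PySem.Chars.isspace c = true) :
    PySem.Chars.split₀ (sp ++ t) = PySem.Chars.split₀ t := by
  induction sp with
  | nil => simp
  | cons c sp' ih =>
    have hc : PySem.Chars.isspace c = true := h c (by simp)
    have ih' := ih (fun d hd => h d (by simp [hd]))
    simp only [PySem.Chars.split₀] at *
    rw [List.cons_append, pv_go_cons_space c (sp' ++ t) [] [] hc]
    simpa using ih'

lemma pv_go_nonspace_prefix (w : List Char) : ∀ (t cur : List Char) (acc : List (List Char)),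
    (∀ c ∈ w, PySem.Chars.isspace c = false) →
    PySem.Chars.split₀.go (w ++ t) cur acc = PySem.Chars.split₀.go t (w.reverse ++ cur) acc := by
  induction w with
  | nil => intro t cur acc _; simp
  | cons c w' ih =>
    intro t cur acc h
    rw [List.cons_append, pv_go_cons_nonspace c (w' ++ t) cur acc (h c (by simp)),
        ih t (c :: cur) acc (fun d hd => h d (by simp [hd]))]
    simp

lemma pv_split₀_word (w rest : List Char) (hw : w ≠ [])
    (hns : ∀ c ∈ w, PySem.Chars.isspace c = false)
    (hr : rest = [] ∨ ∃ d rest', rest = d :: rest' ∧ PySem.Chars.isspace d = true) :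
    PySem.Chars.split₀ (w ++ rest) = w :: PySem.Chars.split₀ rest := by
  have hwr : w.reverse.isEmpty = false := by
    cases w with
    | nil => exact absurd rfl hw
    | cons a b => simp [List.isEmpty_eq_false_iff]
  simp only [PySem.Chars.split₀]
  rw [pv_go_nonspace_prefix w rest [] [] hns]
  rcases hr with rfl | ⟨d, rest', rfl, hd⟩
  · rw [pv_go_nil, pv_go_nil]
    simp [hwr]
  · rw [pv_go_cons_space d rest' (w.reverse ++ []) [] hd,
        pv_go_cons_space d rest' [] [] hd]
    simp only [List.append_nil, hwr, Bool.false_eq_true, if_false, List.isEmpty_nil, if_true]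
    rw [pv_go_acc rest' [] [w.reverse.reverse]]
    simp

lemma pv_find_at (sp w rest : List Char) (hsp : ∀ c ∈ sp, PySem.Chars.isspace c = true)
    (hw : w ≠ []) (hns : ∀ c ∈ w, PySem.Chars.isspace c = false) :
    PySem.Chars.find (sp ++ w ++ rest) w = sp.length := by
  set s := sp ++ w ++ rest with hs
  have hinf : w <:+: s := ⟨sp, rest, by simp [hs]⟩
  have hne : PySem.Chars.find s w ≠ -1 := (PySem.Chars.find_ne_neg_one_iff s w).mpr hinf
  have hnn : 0 ≤ PySem.Chars.find s w := (PySem.Chars.find_nonneg_iff s w).mpr hinf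
  have hspec := PySem.Chars.findFrom_natCast_spec s w 0 (by simp) (by simpa using hne)
  rw [show ((0 : Nat) : Int) = 0 from rfl, PySem.Chars.findFrom_zero] at hspec
  obtain ⟨-, hpre, hmin⟩ := hspec
  have hdropsp : List.drop sp.length s = w ++ rest := by
    rw [hs, List.append_assoc, List.drop_left]
  have hub : (PySem.Chars.find s w).toNat ≤ sp.length := by
    by_contra hlt
    exact hmin sp.length (Nat.zero_le _) (by omega) (by rw [hdropsp]; exact List.prefix_append w rest)
  have hlb : sp.length ≤ (PySem.Chars.find s w).toNat := by
    by_contra hlt'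
    obtain ⟨j, hj⟩ : ∃ j, (PySem.Chars.find s w).toNat = j := ⟨_, rfl⟩
    rw [hj] at hpre hlt'
    have hlt : j < sp.length := by omega
    have hdrop : List.drop j s = sp[j] :: (List.drop (j + 1) sp ++ (w ++ rest)) := by
      rw [hs, List.append_assoc, List.drop_append_of_le_length (by omega),
          ← List.getElem_cons_drop (as := sp) (i := j) hlt, List.cons_append]
    obtain ⟨cw, w', rfl⟩ := List.exists_cons_of_ne_nil hw
    rw [hdrop] at hpre
    have hheads : cw = sp[j] := (List.cons_prefix_cons.mp hpre).1
    have h1 : PySem.Chars.isspace cw = false := hns cw (by simp)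
    have h2 : PySem.Chars.isspace sp[j] = true := hsp _ (List.getElem_mem _)
    rw [hheads, h2] at h1
    exact absurd h1 (by simp)
  omega

lemma pv_findFrom_at (pre sp w rest : List Char) (hsp : ∀ c ∈ sp, PySem.Chars.isspace c = true)
    (hw : w ≠ []) (hns : ∀ c ∈ w, PySem.Chars.isspace c = false) :
    PySem.Chars.findFrom (pre ++ sp ++ w ++ rest) w pre.length = ((pre.length + sp.length : Nat) : Int) := by
  have hlen : pre.length ≤ (pre ++ sp ++ w ++ rest).length := by simp
  rw [PySem.Chars.findFrom_natCast (pre ++ sp ++ w ++ rest) w pre.length hlen]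
  have hdrop : List.drop pre.length (pre ++ sp ++ w ++ rest) = sp ++ w ++ rest := by
    rw [List.append_assoc, List.append_assoc, List.drop_left, ← List.append_assoc]
  rw [hdrop, pv_find_at sp w rest hsp hw hns]
  rw [if_neg (by omega)]
  push_cast
  ring

lemma pv_foldA (n : Nat) : ∀ (pre suffix : List Char) (acc : List (Int × Int)),
    suffix.length ≤ n →
    (List.foldl (pvStepAC (pre ++ suffix)) (acc, (pre.length : Int)) (PySem.Chars.split₀ suffix)).1
      = acc ++ refWP suffix pre.length := by
  induction n with
  | zero =>
    intro pre suffix acc h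
    have hsuf : suffix = [] := List.length_eq_zero_iff.mp (by omega)
    subst hsuf
    simp [PySem.Chars.split₀, pv_go_nil, refWP]
  | succ n ih =>
    intro pre suffix acc h
    rcases pv_decomp suffix with hall | ⟨sp, w, rest, rfl, hsp, hw, hns, hr⟩
    · have h1 : PySem.Chars.split₀ suffix = [] := by
        have := pv_split₀_spaces suffix [] hall
        simpa [PySem.Chars.split₀, pv_go_nil] using this
      have h2 : refWP suffix pre.length = [] := by
        have := pv_refWP_spaces suffix [] pre.length hall
        simpa [refWP] using this
      simp [h1, h2]
    · have hsplit : PySem.Chars.split₀ ((sp ++ w) ++ rest) = w :: PySem.Chars.split₀ rest := by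
        rw [List.append_assoc, pv_split₀_spaces sp (w ++ rest) hsp, pv_split₀_word w rest hw hns hr]
      have htext : pre ++ ((sp ++ w) ++ rest) = ((pre ++ sp) ++ w) ++ rest := by simp
      have hff : PySem.Chars.findFrom (pre ++ ((sp ++ w) ++ rest)) w (pre.length : Int)
          = ((pre.length + sp.length : Nat) : Int) := by
        rw [htext]
        exact pv_findFrom_at pre sp w rest hsp hw hns
      have hstep : pvStepAC (pre ++ ((sp ++ w) ++ rest)) (acc, (pre.length : Int)) w
          = (acc ++ [(((pre.length + sp.length : Nat) : Int),
                      ((pre.length + sp.length + w.length : Nat) : Int))],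
             ((pre.length + sp.length + w.length : Nat) : Int)) := by
        simp only [pvStepAC, hff]
        rw [if_neg (by omega)]
        have e1 : ((pre.length + sp.length : Nat) : Int) + (w.length : Int)
            = ((pre.length + sp.length + w.length : Nat) : Int) := by push_cast; ring
        rw [e1]
      rw [hsplit, List.foldl_cons, hstep]
      have hpre' : ((pre.length + sp.length + w.length : Nat) : Int)
          = (((pre ++ sp ++ w).length : Nat) : Int) := by simp; ring
      have htext2 : pre ++ ((sp ++ w) ++ rest) = (pre ++ sp ++ w) ++ rest := by simp
      rw [hpre', htext2, ih (pre ++ sp ++ w) rest _ (by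
        have hw1 : 0 < w.length := List.length_pos_of_ne_nil hw
        simp at h ⊢; omega)]
      rw [List.append_assoc sp w rest, pv_refWP_spaces sp (w ++ rest) pre.length hsp,
          pv_refWP_word w rest (pre.length + sp.length) hw hns hr]
      simp
      exact ⟨by ring, by congr 1; omega⟩

def pvFinishB (st : List (Int × Int) × Int) (L : Nat) : List (Int × Int) :=
  if st.2 ≥ 0 then st.1 ++ [(st.2, (L : Int))] else st.1

lemma pv_foldB_spaces (sp : List Char) : ∀ (k : Int) (acc : List (Int × Int)),
    (∀ c ∈ sp, PySem.Chars.isspace c = true) →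
    List.foldl pvStepB (acc, -1) (PySem.List.enumerate sp k) = (acc, -1) := by
  induction sp with
  | nil => intro k acc _; simp [PySem.List.enumerate_nil]
  | cons c sp' ih =>
    intro k acc h
    rw [PySem.List.enumerate_cons, List.foldl_cons]
    have : pvStepB (acc, -1) (k, c) = (acc, -1) := by
      simp [pvStepB, h c (by simp)]
    rw [this, ih (k + 1) acc (fun d hd => h d (by simp [hd]))]

lemma pv_foldB_nonspace (ws : List Char) : ∀ (k : Int) (acc : List (Int × Int)) (s : Int),
    0 ≤ s → (∀ c ∈ ws, PySem.Chars.isspace c = false) →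
    List.foldl pvStepB (acc, s) (PySem.List.enumerate ws k) = (acc, s) := by
  induction ws with
  | nil => intro k acc s _ _; simp [PySem.List.enumerate_nil]
  | cons c ws' ih =>
    intro k acc s hs h
    rw [PySem.List.enumerate_cons, List.foldl_cons]
    have : pvStepB (acc, s) (k, c) = (acc, s) := by
      simp [pvStepB, h c (by simp)]
      omega
    rw [this, ih (k + 1) acc s hs (fun d hd => h d (by simp [hd]))]

lemma pv_foldB (n : Nat) : ∀ (pre suffix : List Char) (acc : List (Int × Int)),
    suffix.length ≤ n →
    pvFinishB (List.foldl pvStepB (acc, -1) (PySem.List.enumerate suffix (pre.length : Int)))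
        ((pre ++ suffix).length)
      = acc ++ refWP suffix pre.length := by
  induction n with
  | zero =>
    intro pre suffix acc h
    have hsuf : suffix = [] := List.length_eq_zero_iff.mp (by omega)
    subst hsuf
    simp [PySem.List.enumerate_nil, pvFinishB, refWP]
  | succ n ih =>
    intro pre suffix acc h
    rcases pv_decomp suffix with hall | ⟨sp, w, rest, rfl, hsp, hw, hns, hr⟩
    · rw [pv_foldB_spaces suffix (pre.length : Int) acc hall]
      have h2 : refWP suffix pre.length = [] := by
        have := pv_refWP_spaces suffix [] pre.length hall
        simpa [refWP] using this
      simp [pvFinishB, h2]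
    · obtain ⟨c, w', rfl⟩ := List.exists_cons_of_ne_nil hw
      have hc : PySem.Chars.isspace c = false := hns c (by simp)
      rw [List.append_assoc, PySem.List.enumerate_append, List.foldl_append,
          pv_foldB_spaces sp (pre.length : Int) acc hsp]
      rw [List.cons_append, PySem.List.enumerate_cons, List.foldl_cons]
      have hstep1 : pvStepB (acc, -1) ((pre.length : Int) + (sp.length : Int), c)
          = (acc, (pre.length : Int) + (sp.length : Int)) := by
        simp [pvStepB, hc]
      rw [hstep1]
      rw [PySem.List.enumerate_append, List.foldl_append,
          pv_foldB_nonspace w' _ acc _ (by positivity) (fun d hd => hns d (by simp [hd]))]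
      have hRHS : refWP (sp ++ c :: (w' ++ rest)) pre.length
          = (((pre.length + sp.length : Nat) : Int),
             ((pre.length + sp.length + (w'.length + 1) : Nat) : Int))
              :: refWP rest (pre.length + sp.length + (w'.length + 1)) := by
        have hform : sp ++ c :: (w' ++ rest) = sp ++ ((c :: w') ++ rest) := by simp
        rw [hform, pv_refWP_spaces sp ((c :: w') ++ rest) pre.length hsp,
            pv_refWP_word (c :: w') rest (pre.length + sp.length) hw hns hr]
        simp only [List.length_cons]
      rw [hRHS]
      rcases hr with rfl | ⟨d, rest', rfl, hd⟩
      · simp only [PySem.List.enumerate_nil, List.foldl_nil, pvFinishB]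
        rw [if_pos (by positivity)]
        rw [show refWP ([] : List Char) (pre.length + sp.length + (w'.length + 1)) = [] by rw [refWP]]
        simp
        ring
      · rw [PySem.List.enumerate_cons, List.foldl_cons]
        have hstep2 : pvStepB (acc, (pre.length : Int) + (sp.length : Int))
              ((pre.length : Int) + (sp.length : Int) + 1 + (w'.length : Int), d)
            = (acc ++ [((pre.length : Int) + (sp.length : Int),
                (pre.length : Int) + (sp.length : Int) + 1 + (w'.length : Int))], -1) := by
          rw [pvStepB]
          rw [if_pos (by simpa using hd), if_pos (by positivity)]
        rw [hstep2]
        have ho : (pre.length : Int) + (sp.length : Int) + 1 + (w'.length : Int) + 1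
            = (((pre ++ (sp ++ ((c :: w') ++ [d]))).length : Nat) : Int) := by
          simp; ring
        rw [ho]
        have htext3 : pre ++ (sp ++ c :: (w' ++ d :: rest')) =
            (pre ++ (sp ++ ((c :: w') ++ [d]))) ++ rest' := by simp
        rw [htext3, ih (pre ++ (sp ++ ((c :: w') ++ [d]))) rest' _ (by simp at h ⊢; omega)]
        have hidx : refWP rest' (pre ++ (sp ++ ((c :: w') ++ [d]))).length
            = refWP (d :: rest') (pre.length + sp.length + (w'.length + 1)) := by
          rw [refWP, dif_pos hd]
          congr 1
          simp; omega
        rw [hidx, refWP, dif_pos hd]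
        simp
        ring

lemma pv_A_eq_ref (text : String) : build_word_positions_py text = refWP text.toList 0 := by
  have hfun : (fun (st : List (Int × Int) × Int) (w : String) => pvStepAC text.toList st w.toList)
      = pvStepA text := by
    funext st w
    simp [pvStepA, pvStepAC, PySem.Str.findFrom_eq, PySem.Str.len_eq]
  have hfold : List.foldl (pvStepA text) ([], 0) (PySem.Str.split₀ text)
      = List.foldl (pvStepAC text.toList) ([], 0) ((PySem.Str.split₀ text).map String.toList) := by
    rw [List.foldl_map, hfun]
  have h0 := pv_foldA text.toList.length [] text.toList []
    (by simp)
  simp only [List.nil_append, List.length_nil, Nat.cast_zero] at h0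
  unfold build_word_positions_py
  show (List.foldl (pvStepA text) ([], 0) (PySem.Str.split₀ text)).1 = refWP text.toList 0
  rw [hfold, PySem.Str.split₀_map_toList]
  simpa using h0

lemma pv_B_eq_ref (text : String) : build_word_positions_py_alt text = refWP text.toList 0 := by
  have h0 := pv_foldB text.toList.length [] text.toList [] (by simp)
  simp only [List.nil_append, List.length_nil, Nat.cast_zero] at h0
  unfold build_word_positions_py_alt
  rw [← h0]
  simp [pvFinishB, PySem.Str.len_eq]

-- ===== VERDICT (by name: the statement is the Claim_ definition above) =====
theorem build_word_positions_py_spec : Claim_equal_build_word_positions_py := by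
  intro text _
  unfold Spec_build_word_positions_py
  rw [pv_A_eq_ref, pv_B_eq_ref]
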